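-- pv_equiv track=rewrite | github.com/cafrii/omega2 | 백준/Gold/10713. 기차 여행/기차 여행.py | solve
-- ===== SOURCE A (Python) =====
-- def solve(N:int, Ms:list[int], P:list[tuple[int,int,int]])->int:
--     '''
--     Args:
--     Returns:
--
--     각 철도 N-1 개를 총 몇번씩 이용하는지를 카운트.
--     이것만 알고 있으면 티켓 비용과 IC카드 비용을 그냥 비교해서 더 적은 값으로 선택하면 됨.
--     M-1 번의 이동 각각에 대해서 시작/끝 기록. P1->P2 가 2 5 라면 도시 2에 +1, 도시 5에서 -1.
--     이 차분 합을 누적 합으로 변환하면 이용 정보 완성.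
--     '''
--     M = len(Ms)
--
--     # usage count (difference)
--     uc = [0] * (N+1)
--     # uc[k]는 철도 k(도시 k 와 도시 k+1 사이)의 이용 회수
--     # uc[0]은 미사용. uc[N]은 철도 N은 존재하지 않지만 편의를 위해 공간 마련.
--     # uc[1] 부터 uc[N-1] 만 사용.
--
--     for j in range(1, M): # j: 1 ~ M-1
--         # 도시 Ms[j-1] 에서 Ms[j] 로의 이동
--         s,e = Ms[j-1],Ms[j]  # start, end
--         s1,e1 = min(s,e),max(s,e)
--         uc[s1] += 1; uc[e1] -= 1
--         # e 는 N이 될 수 있음. 철도 N은 없지만 편의를 위해 -1을 기록 허용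
--
--     # 누적합으로 변경. uc diff -> uc
--     for j in range(1, N+1):
--         uc[j] = uc[j-1] + uc[j]
--     #assert uc[N] == 0
--
--     # 각 철도 별로 비용 비교
--     total_cost = 0
--     for j in range(1, N):
--         if uc[j] == 0: continue
--         a,b,c = P[j]
--         c1 = a * uc[j]
--         c2 = b * uc[j] + c
--         total_cost += min(c1, c2)
--     return total_cost
-- ===== SOURCE B (Python) =====
-- def solve(N: int, Ms: list[int], P: list[tuple[int, int, int]]) -> int:
--     # Direct counting: for each move bump every railway on its path, no
--     # difference array / prefix-sum pass.
--     uc = [0] * (N + 1)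
--     for s, e in zip(Ms, Ms[1:]):
--         for k in range(min(s, e), max(s, e)):
--             uc[k] += 1
--     total = 0
--     for j in range(1, N):
--         if uc[j] == 0:
--             continue
--         a, b, c = P[j]
--         total += min(a * uc[j], b * uc[j] + c)
--     return total
-- ===== Notes on version B (the rewrite author's own statement) =====
-- stated objective: alternative
-- what changed: Replaces the difference-array + prefix-sum accumulation with direct per-move counting: each move increments every railway on its path immediately (no +1/-1 diff marks and no second prefix-sum pass), the final fare comparison loop is unchanged.
-- outside the precondition, e.g. on solve(3, [-1, 2], [(0, 0, 0), (5, 1, 1), (5, 1, 1)]): A returns -5, B returns 2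
import Mathlib
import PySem

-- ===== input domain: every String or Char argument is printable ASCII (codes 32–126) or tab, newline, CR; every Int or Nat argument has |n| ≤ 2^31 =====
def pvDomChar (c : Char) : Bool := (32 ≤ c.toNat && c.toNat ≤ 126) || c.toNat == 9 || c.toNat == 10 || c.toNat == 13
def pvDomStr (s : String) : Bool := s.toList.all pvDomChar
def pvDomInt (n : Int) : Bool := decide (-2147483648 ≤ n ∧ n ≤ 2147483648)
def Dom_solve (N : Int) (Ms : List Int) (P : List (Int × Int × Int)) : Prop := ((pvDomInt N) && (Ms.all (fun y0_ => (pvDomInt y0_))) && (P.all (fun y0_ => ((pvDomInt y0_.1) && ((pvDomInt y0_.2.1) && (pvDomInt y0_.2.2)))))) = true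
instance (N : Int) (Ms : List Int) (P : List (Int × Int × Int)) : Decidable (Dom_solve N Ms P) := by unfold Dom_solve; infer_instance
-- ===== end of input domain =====

-- B replaces A's difference-array + prefix-sum accumulation by direct per-move
-- counting (each move increments every railway on its path); same final fare loop.
-- Objective: alternative (not claimed faster).

-- ===== PORT A =====
-- uc[s1] += 1; uc[e1] -= 1   (one move recorded as a +1/-1 difference pair)
def diffStep (uc : List Int) (se : Int × Int) : List Int :=
  let s1 := min se.1 se.2
  let e1 := max se.1 se.2
  let uc' := PySem.List.pySetD uc s1 (PySem.List.pyGetD uc s1 0 + 1)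
  PySem.List.pySetD uc' e1 (PySem.List.pyGetD uc' e1 0 - 1)

-- uc[j] = uc[j-1] + uc[j]   (one step of the prefix-sum pass)
def prefixStep (uc : List Int) (j : Int) : List Int :=
  PySem.List.pySetD uc j (PySem.List.pyGetD uc (j - 1) 0 + PySem.List.pyGetD uc j 0)

def solve (N : Int) (Ms : List Int) (P : List (Int × Int × Int)) : Int :=
  -- for j in range(1, M): s,e = Ms[j-1], Ms[j]; record the diff pair
  let uc1 := (PySem.List.pyRange 1 (PySem.List.len Ms) 1).foldl
      (fun uc j => diffStep uc (PySem.List.pyGetD Ms (j - 1) 0, PySem.List.pyGetD Ms j 0))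
      (List.replicate (N + 1).toNat 0)
  -- for j in range(1, N+1): uc[j] = uc[j-1] + uc[j]
  let uc2 := (PySem.List.pyRange 1 (N + 1) 1).foldl prefixStep uc1
  -- for j in range(1, N): compare ticket vs IC cost
  (PySem.List.pyRange 1 N 1).foldl (fun tc j =>
      let u := PySem.List.pyGetD uc2 j 0
      if u = 0 then tc
      else
        let abc := PySem.List.pyGetD P j (0, 0, 0)
        tc + min (abc.1 * u) (abc.2.1 * u + abc.2.2)) 0

-- ===== PORT B =====
-- uc[k] += 1
def bumpRail (uc : List Int) (k : Int) : List Int :=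
  PySem.List.pySetD uc k (PySem.List.pyGetD uc k 0 + 1)

-- for k in range(min(s,e), max(s,e)): uc[k] += 1   (count the whole path at once)
def pathStep (uc : List Int) (se : Int × Int) : List Int :=
  (PySem.List.pyRange (min se.1 se.2) (max se.1 se.2) 1).foldl bumpRail uc

def solve_alt (N : Int) (Ms : List Int) (P : List (Int × Int × Int)) : Int :=
  -- for s, e in zip(Ms, Ms[1:]): bump every railway on the path
  let uc := (Ms.zip (Ms.drop 1)).foldl pathStep (List.replicate (N + 1).toNat 0)
  -- for j in range(1, N): compare ticket vs IC cost
  (PySem.List.pyRange 1 N 1).foldl (fun tc j =>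
      let u := PySem.List.pyGetD uc j 0
      if u = 0 then tc
      else
        let abc := PySem.List.pyGetD P j (0, 0, 0)
        tc + min (abc.1 * u) (abc.2.1 * u + abc.2.2)) 0

-- ===== PRECONDITION & SPEC =====
-- Pre_ excludes inputs where Python A raises IndexError (a city index out of uc's index
-- range, or P missing the fare triple of a used railway) and inputs where a negative city
-- index reaches the fare loop, where A's negative-index wraparound into uc is an accident
-- of the implementation.
def Pre_solve (N : Int) (Ms : List Int) (P : List (Int × Int × Int)) : Prop :=
  (N ≤ 1 ∧ (2 ≤ Ms.length → ∀ m ∈ Ms, -(N + 1) ≤ m ∧ m ≤ N)) ∨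
  (0 ≤ N ∧ (∀ m ∈ Ms, 0 ≤ m ∧ m ≤ N) ∧
    (∀ p ∈ Ms.zip (Ms.drop 1), max p.1 p.2 ≤ (P.length : Int) ∨ min p.1 p.2 = max p.1 p.2))
instance (N : Int) (Ms : List Int) (P : List (Int × Int × Int)) : Decidable (Pre_solve N Ms P) := by unfold Pre_solve; infer_instance

def pvWitness_solve : Int × List Int × (List (Int × Int × Int)) :=
  (3, [1, 3, 2], [(0, 0, 0), (2, 1, 1), (3, 1, 1)])

def Spec_solve (N : Int) (Ms : List Int) (P : List (Int × Int × Int)) (out : Int) : Prop := out = solve_alt N Ms P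
instance (N : Int) (Ms : List Int) (P : List (Int × Int × Int)) (out : Int) : Decidable (Spec_solve N Ms P out) := by unfold Spec_solve; infer_instance

-- ===== CLAIM (what is proved, stated in full; the proofs are below) =====
def Claim_equal_solve : Prop := ∀ (N : Int) (Ms : List Int) (P : List (Int × Int × Int)), Dom_solve N Ms P → Pre_solve N Ms P → Spec_solve N Ms P (solve N Ms P)

-- ===== LEMMAS AND PROOFS =====

theorem pvWitness_ok : Dom_solve pvWitness_solve.1 pvWitness_solve.2.1 pvWitness_solve.2.2 ∧
    Pre_solve pvWitness_solve.1 pvWitness_solve.2.1 pvWitness_solve.2.2 := by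
  constructor <;> decide

-- usage count of railway j: number of adjacent moves whose path covers j
def pvCnt (ps : List (Int × Int)) (j : Nat) : Int :=
  (ps.map fun p => if min p.1 p.2 ≤ (j : Int) ∧ (j : Int) < max p.1 p.2 then (1 : Int) else 0).sum

-- diff value at j: +1 per move starting at j, -1 per move ending at j
def pvDval (ps : List (Int × Int)) (j : Nat) : Int :=
  (ps.map fun p => (if min p.1 p.2 = (j : Int) then (1 : Int) else 0)
                 - (if max p.1 p.2 = (j : Int) then (1 : Int) else 0)).sum

theorem pvCnt_cons (p : Int × Int) (ps : List (Int × Int)) (j : Nat) :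
    pvCnt (p :: ps) j
      = (if min p.1 p.2 ≤ (j : Int) ∧ (j : Int) < max p.1 p.2 then (1 : Int) else 0) + pvCnt ps j := by
  simp [pvCnt]

theorem pvDval_cons (p : Int × Int) (ps : List (Int × Int)) (j : Nat) :
    pvDval (p :: ps) j
      = ((if min p.1 p.2 = (j : Int) then (1 : Int) else 0)
         - (if max p.1 p.2 = (j : Int) then (1 : Int) else 0)) + pvDval ps j := by
  simp [pvDval]

theorem getD_set (xs : List Int) (i : Nat) (v : Int) (j : Nat) (hi : i < xs.length) :
    (xs.set i v).getD j 0 = if j = i then v else xs.getD j 0 := by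
  by_cases h : j = i
  · subst h; simp [List.getD_eq_getElem?_getD, hi]
  · simp [List.getD_eq_getElem?_getD, Ne.symm h, h]

theorem pyGetD_toNat (xs : List Int) (i : Int) (h0 : 0 ≤ i) :
    PySem.List.pyGetD xs i 0 = xs.getD i.toNat 0 := by
  rw [show i = ((i.toNat : Nat) : Int) from by omega, PySem.List.pyGetD_natCast,
      Int.toNat_natCast]

theorem getD_replicate_zero (n j : Nat) : (List.replicate n (0 : Int)).getD j 0 = 0 := by
  rw [List.getD_eq_getElem?_getD, List.getElem?_replicate]
  split_ifs <;> rfl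

theorem length_bumpRail (uc : List Int) (k : Int) : (bumpRail uc k).length = uc.length := by
  simp [bumpRail, PySem.List.length_pySetD]

theorem length_pathRange (r : List Int) (uc : List Int) :
    (r.foldl bumpRail uc).length = uc.length := by
  induction r generalizing uc with
  | nil => rfl
  | cons k r ih => simp [List.foldl_cons, ih, length_bumpRail]

theorem length_pathStep (uc : List Int) (se : Int × Int) : (pathStep uc se).length = uc.length := by
  simp [pathStep, length_pathRange]

theorem length_pathFold (ps : List (Int × Int)) (uc : List Int) :
    (ps.foldl pathStep uc).length = uc.length := by
  induction ps generalizing uc with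
  | nil => rfl
  | cons p ps ih => simp [List.foldl_cons, ih, length_pathStep]

theorem length_diffStep (uc : List Int) (se : Int × Int) : (diffStep uc se).length = uc.length := by
  simp [diffStep, PySem.List.length_pySetD]

theorem length_diffFold (ps : List (Int × Int)) (uc : List Int) :
    (ps.foldl diffStep uc).length = uc.length := by
  induction ps generalizing uc with
  | nil => rfl
  | cons p ps ih => simp [List.foldl_cons, ih, length_diffStep]

theorem length_prefixStep (uc : List Int) (j : Int) : (prefixStep uc j).length = uc.length := by
  simp [prefixStep, PySem.List.length_pySetD]

theorem length_prefixFold (rs : List Int) (d : List Int) :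
    (rs.foldl prefixStep d).length = d.length := by
  induction rs generalizing d with
  | nil => rfl
  | cons r rs ih => simp [List.foldl_cons, ih, length_prefixStep]

theorem bumpRail_getD (uc : List Int) (k : Int) (j : Nat)
    (h0 : 0 ≤ k) (hk : k < (uc.length : Int)) :
    (bumpRail uc k).getD j 0 = uc.getD j 0 + (if (j : Int) = k then 1 else 0) := by
  have hkn : k.toNat < uc.length := by omega
  rw [bumpRail, PySem.List.pySetD_of_nonneg uc _ h0, pyGetD_toNat uc k h0,
      getD_set _ _ _ _ hkn]
  by_cases h : j = k.toNat
  · subst h; rw [if_pos rfl, if_pos (by omega)]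
  · rw [if_neg h, if_neg (by omega : ¬((j : Int) = k)), add_zero]

theorem rangeInc_aux (n : Nat) : ∀ (a b : Int) (uc : List Int) (j : Nat),
    (b - a).toNat = n → 0 ≤ a → b ≤ (uc.length : Int) →
    ((PySem.List.pyRange a b 1).foldl bumpRail uc).getD j 0
      = uc.getD j 0 + (if a ≤ (j : Int) ∧ (j : Int) < b then 1 else 0) := by
  induction n with
  | zero =>
      intro a b uc j hn h0 hb
      rw [PySem.List.pyRange_one_eq_nil (by omega), List.foldl_nil,
          if_neg (by omega : ¬(a ≤ (j : Int) ∧ (j : Int) < b)), add_zero]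
  | succ n ih =>
      intro a b uc j hn h0 hb
      have hab : a < b := by omega
      rw [PySem.List.pyRange_one_cons hab, List.foldl_cons,
          ih (a + 1) b _ j (by omega) (by omega) (by rw [length_bumpRail]; exact hb),
          bumpRail_getD uc a j h0 (by omega)]
      split_ifs <;> omega

theorem pathFold_getD (ps : List (Int × Int)) (uc : List Int) (j : Nat)
    (hps : ∀ p ∈ ps, 0 ≤ min p.1 p.2 ∧ max p.1 p.2 ≤ (uc.length : Int)) :
    (ps.foldl pathStep uc).getD j 0 = uc.getD j 0 + pvCnt ps j := by
  induction ps generalizing uc with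
  | nil => simp [pvCnt]
  | cons p ps ih =>
      have hp := hps p List.mem_cons_self
      rw [List.foldl_cons,
          ih _ (fun q hq => by
            have h := hps q (List.mem_cons_of_mem _ hq)
            rwa [length_pathStep]),
          pathStep,
          rangeInc_aux ((max p.1 p.2 - min p.1 p.2)).toNat _ _ _ _ rfl hp.1 hp.2,
          pvCnt_cons]
      omega

theorem diffStep_getD (uc : List Int) (se : Int × Int) (j : Nat)
    (h1 : 0 ≤ min se.1 se.2) (h2 : max se.1 se.2 < (uc.length : Int)) :
    (diffStep uc se).getD j 0 = uc.getD j 0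
      + ((if min se.1 se.2 = (j : Int) then (1 : Int) else 0)
         - (if max se.1 se.2 = (j : Int) then (1 : Int) else 0)) := by
  have hmm : min se.1 se.2 ≤ max se.1 se.2 := min_le_max
  have h1' : (0 : Int) ≤ max se.1 se.2 := le_trans h1 hmm
  simp only [diffStep]
  rw [PySem.List.pySetD_of_nonneg uc _ h1, pyGetD_toNat uc _ h1,
      PySem.List.pySetD_of_nonneg _ _ h1',
      pyGetD_toNat _ _ h1']
  rw [getD_set (uc.set (min se.1 se.2).toNat _) (max se.1 se.2).toNat _ j
        (by rw [List.length_set]; omega)]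
  rw [getD_set uc (min se.1 se.2).toNat _ (max se.1 se.2).toNat (by omega)]
  rw [getD_set uc (min se.1 se.2).toNat _ j (by omega)]
  rcases eq_or_ne j (max se.1 se.2).toNat with hje | hje
  · subst hje
    rw [if_pos rfl]
    rcases eq_or_ne (max se.1 se.2).toNat (min se.1 se.2).toNat with hes | hes
    · rw [hes, if_pos rfl, if_pos (by omega), if_pos (by omega)]
      ring
    · rw [if_neg hes, if_neg (by omega), if_pos (by omega)]
      ring
  · rw [if_neg hje]
    rcases eq_or_ne j (min se.1 se.2).toNat with hjs | hjs
    · subst hjs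
      rw [if_pos rfl, if_pos (by omega), if_neg (by omega)]
      ring
    · rw [if_neg hjs, if_neg (by omega), if_neg (by omega)]
      ring

theorem diffFold_getD (ps : List (Int × Int)) (uc : List Int) (j : Nat)
    (hps : ∀ p ∈ ps, 0 ≤ min p.1 p.2 ∧ max p.1 p.2 < (uc.length : Int)) :
    (ps.foldl diffStep uc).getD j 0 = uc.getD j 0 + pvDval ps j := by
  induction ps generalizing uc with
  | nil => simp [pvDval]
  | cons p ps ih =>
      have hp := hps p List.mem_cons_self
      rw [List.foldl_cons,
          ih _ (fun q hq => by
            have h := hps q (List.mem_cons_of_mem _ hq)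
            rwa [length_diffStep]),
          diffStep_getD uc p j hp.1 hp.2,
          pvDval_cons]
      omega

theorem prefixFold_getD (d : List Int) (t : Nat) (ht : t ≤ d.length) :
    ∀ j : Nat, ((PySem.List.pyRange 1 (t : Int) 1).foldl prefixStep d).getD j 0
      = if j < t then ∑ i ∈ Finset.range (j + 1), d.getD i 0 else d.getD j 0 := by
  induction t with
  | zero =>
      intro j
      rw [PySem.List.pyRange_one_eq_nil (by omega), List.foldl_nil, if_neg (by omega)]
  | succ t ih =>
      intro j
      rcases Nat.eq_zero_or_pos t with h0 | hpos
      · subst h0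
        rw [PySem.List.pyRange_one_eq_nil (by norm_num), List.foldl_nil]
        rcases Nat.eq_zero_or_pos j with hj | hj
        · subst hj; rw [if_pos (by omega), Finset.sum_range_one]
        · rw [if_neg (by omega)]
      · have hcast : ((t + 1 : Nat) : Int) = (t : Int) + 1 := by push_cast; ring
        rw [hcast, PySem.List.pyRange_one_succ_right (by omega), List.foldl_append,
            List.foldl_cons, List.foldl_nil]
        set r := (PySem.List.pyRange 1 (t : Int) 1).foldl prefixStep d with hr
        have hlen : r.length = d.length := length_prefixFold _ _
        have htlt : t < d.length := by omega
        have iht := ih (by omega)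
        simp only [prefixStep]
        rw [show ((t : Int) - 1) = ((t - 1 : Nat) : Int) from by omega,
            PySem.List.pyGetD_natCast, PySem.List.pyGetD_natCast, PySem.List.pySetD_natCast,
            getD_set r t _ j (by omega)]
        by_cases hjt : j = t
        · subst hjt
          have hA := iht (j - 1)
          rw [if_pos (by omega)] at hA
          have hB := iht j
          rw [if_neg (by omega)] at hB
          rw [hA, hB, show j - 1 + 1 = j from by omega, if_pos rfl, if_pos (by omega),
              Finset.sum_range_succ]
        · rw [if_neg hjt, iht j]
          by_cases hlt : j < t
          · rw [if_pos hlt, if_pos (by omega)]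
          · rw [if_neg hlt, if_neg (by omega)]

theorem sum_indicator (v : Int) (j : Nat) (hv : 0 ≤ v) :
    (∑ i ∈ Finset.range (j + 1), if v = (i : Int) then (1 : Int) else 0)
      = if v ≤ (j : Int) then 1 else 0 := by
  induction j with
  | zero =>
      rw [Finset.sum_range_one]
      have h0 : ((0 : Nat) : Int) = 0 := rfl
      rw [h0]
      split_ifs <;> omega
  | succ j ih =>
      rw [Finset.sum_range_succ, ih]
      split_ifs <;> omega

theorem sum_dval_eq_cnt (ps : List (Int × Int)) (j : Nat)
    (hps : ∀ p ∈ ps, 0 ≤ min p.1 p.2) :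
    (∑ i ∈ Finset.range (j + 1), pvDval ps i) = pvCnt ps j := by
  induction ps with
  | nil => simp [pvDval, pvCnt]
  | cons p ps ih =>
      have h1 : (0 : Int) ≤ min p.1 p.2 := hps p List.mem_cons_self
      simp only [pvDval_cons]
      rw [Finset.sum_add_distrib, ih (fun q hq => hps q (List.mem_cons_of_mem _ hq)),
          Finset.sum_sub_distrib, sum_indicator _ _ h1,
          sum_indicator _ _ (le_trans h1 min_le_max), pvCnt_cons]
      split_ifs <;> omega

theorem adjacent_aux {β : Type} (f : β → Int × Int → β) (Ms : List Int) :
    ∀ (n i : Nat) (b : β), Ms.length - i = n →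
      (PySem.List.pyRange ((i : Int) + 1) ((Ms.length : Nat) : Int) 1).foldl
          (fun acc j => f acc (PySem.List.pyGetD Ms (j - 1) 0, PySem.List.pyGetD Ms j 0)) b
        = ((Ms.drop i).zip (Ms.drop (i + 1))).foldl f b := by
  intro n
  induction n with
  | zero =>
      intro i b hn
      rw [PySem.List.pyRange_one_eq_nil (by omega), List.foldl_nil,
          List.drop_eq_nil_of_le (by omega)]
      simp
  | succ n ih =>
      intro i b hn
      have hi : i < Ms.length := by omega
      by_cases h2 : i + 1 < Ms.length
      · rw [PySem.List.pyRange_one_cons (by omega : ((i : Int) + 1) < ((Ms.length : Nat) : Int))]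
        simp only [List.foldl_cons]
        rw [show ((i : Int) + 1) - 1 = ((i : Nat) : Int) from by ring]
        rw [show ((i : Int) + 1) = (((i + 1 : Nat)) : Int) from by push_cast; ring]
        simp only [PySem.List.pyGetD_natCast]
        rw [ih (i + 1) _ (by omega)]
        rw [List.drop_eq_getElem_cons hi, List.drop_eq_getElem_cons h2, List.zip_cons_cons,
            List.foldl_cons, List.getD_eq_getElem Ms 0 hi, List.getD_eq_getElem Ms 0 h2]
      · rw [PySem.List.pyRange_one_eq_nil (by omega), List.foldl_nil,
            show Ms.drop (i + 1) = [] from List.drop_eq_nil_of_le (by omega),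
            List.zip_nil_right, List.foldl_nil]

theorem foldl_pyRange_adjacent {β : Type} (f : β → Int × Int → β) (Ms : List Int) (b : β) :
    (PySem.List.pyRange 1 (PySem.List.len Ms) 1).foldl
        (fun acc j => f acc (PySem.List.pyGetD Ms (j - 1) 0, PySem.List.pyGetD Ms j 0)) b
      = (Ms.zip (Ms.drop 1)).foldl f b := by
  have h := adjacent_aux f Ms Ms.length 0 b (by omega)
  rw [show (((0 : Nat) : Int) + 1) = 1 from by norm_num] at h
  rw [List.drop_zero, show (0 : Nat) + 1 = 1 from rfl] at h
  rw [PySem.List.len_eq]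
  exact h

-- ===== VERDICT (by name: the statement is the Claim_ definition above) =====
theorem solve_spec : Claim_equal_solve := by
  intro N Ms P _hDom hPre
  show solve N Ms P = solve_alt N Ms P
  rcases hPre with ⟨hN1, _⟩ | ⟨hN, hMs, _hP⟩
  · -- N ≤ 1: the fare loop over range(1, N) is empty in both programs
    simp only [solve, solve_alt]
    rw [PySem.List.pyRange_one_eq_nil (show N ≤ 1 from hN1)]
    simp only [List.foldl_nil]
  simp only [solve, solve_alt]
  rw [foldl_pyRange_adjacent diffStep Ms (List.replicate (N + 1).toNat 0)]
  have hpair : ∀ p ∈ Ms.zip (Ms.drop 1), 0 ≤ min p.1 p.2 ∧ max p.1 p.2 ≤ N := by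
    intro p hp
    obtain ⟨a, b⟩ := p
    obtain ⟨hA, hB⟩ := List.of_mem_zip hp
    have h1 := hMs a hA
    have h2 := hMs b (List.mem_of_mem_drop hB)
    constructor <;> simp only [] <;> omega
  have hcast : (((N + 1).toNat : Nat) : Int) = N + 1 := by omega
  have hueq : (PySem.List.pyRange 1 (N + 1) 1).foldl prefixStep
        ((Ms.zip (Ms.drop 1)).foldl diffStep (List.replicate (N + 1).toNat 0))
      = (Ms.zip (Ms.drop 1)).foldl pathStep (List.replicate (N + 1).toNat 0) := by
    have hdlen : ((Ms.zip (Ms.drop 1)).foldl diffStep (List.replicate (N + 1).toNat (0 : Int))).length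
        = (N + 1).toNat := by
      rw [length_diffFold, List.length_replicate]
    apply List.ext_getElem
    · rw [length_prefixFold, length_diffFold, length_pathFold]
    · intro i hi1 hi2
      rw [← List.getD_eq_getElem _ 0 hi1, ← List.getD_eq_getElem _ 0 hi2]
      have hi' : i < (N + 1).toNat := by
        rw [length_prefixFold, hdlen] at hi1; exact hi1
      -- left side: prefix sums of the difference array
      have hpf := prefixFold_getD _ (N + 1).toNat (le_of_eq hdlen.symm) i
      rw [hcast] at hpf
      rw [hpf, if_pos hi']
      have hd : ∀ k : Nat,
          ((Ms.zip (Ms.drop 1)).foldl diffStep (List.replicate (N + 1).toNat (0 : Int))).getD k 0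
            = pvDval (Ms.zip (Ms.drop 1)) k := by
        intro k
        rw [diffFold_getD _ _ k (fun p hp => by
              have h := hpair p hp
              rw [List.length_replicate, hcast]
              exact ⟨h.1, by omega⟩),
            getD_replicate_zero, zero_add]
      rw [Finset.sum_congr rfl (fun k _ => hd k),
          sum_dval_eq_cnt _ _ (fun p hp => (hpair p hp).1)]
      -- right side: direct counting
      rw [pathFold_getD _ _ i (fun p hp => by
            have h := hpair p hp
            rw [List.length_replicate, hcast]
            exact ⟨h.1, by omega⟩),
          getD_replicate_zero, zero_add]
  rw [hueq]
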